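-- pv_equiv track=rewrite | github.com/kmgowda/ds-programs-python | src/unique-str.py | unique_str
-- ===== SOURCE A (Python) =====
-- def unique_str(str):
--     bitmap = 0
--     for c in str:
--         val = 1 << ord(c)
--         if (bitmap&val == 0):
--            bitmap |= val
--         else:
--             return False
--     return True
-- ===== SOURCE B (Python) =====
-- def unique_str(str):
--     return len(set(str)) == len(str)
-- ===== Notes on version B (the rewrite author's own statement) =====
-- stated objective: idiomatic
-- what changed: Replaces A's streaming bitmap scan with early exit by building the whole character set once and comparing its size with the string length.
import Mathlib
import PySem

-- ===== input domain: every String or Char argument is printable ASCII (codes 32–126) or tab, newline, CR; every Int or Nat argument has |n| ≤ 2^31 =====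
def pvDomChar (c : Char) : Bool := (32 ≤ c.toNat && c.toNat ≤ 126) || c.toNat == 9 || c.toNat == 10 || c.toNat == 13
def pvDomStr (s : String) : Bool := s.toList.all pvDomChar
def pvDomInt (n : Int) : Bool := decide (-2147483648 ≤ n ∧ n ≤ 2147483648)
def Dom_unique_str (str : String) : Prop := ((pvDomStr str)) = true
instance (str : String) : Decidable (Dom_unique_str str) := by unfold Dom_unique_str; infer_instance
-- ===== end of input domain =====

-- B builds the full character set and compares sizes (len(set(s)) == len(s)) instead of A's streaming bitmap scan with early exit; same results on all strings.


-- ===== PORT A =====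
-- the Python loop: bitmap accumulator, 'return False' on a repeated bit
def uniqueLoopA : List Char → Nat → Bool
  | [], _ => true
  | c :: rest, bitmap =>
    let val := 1 <<< c.toNat
    if bitmap &&& val = 0 then uniqueLoopA rest (bitmap ||| val) else false

def unique_str (str : String) : Bool := uniqueLoopA str.toList 0

-- ===== PORT B =====
-- len(set(str)) == len(str)
def unique_str_alt (str : String) : Bool :=
  decide (PySem.Set.len (PySem.Set.ofList str.toList) = PySem.Str.len str)

-- ===== PRECONDITION & SPEC =====
def Spec_unique_str (str : String) (out : Bool) : Prop := out = unique_str_alt str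
instance (str : String) (out : Bool) : Decidable (Spec_unique_str str out) := by unfold Spec_unique_str; infer_instance

-- ===== CLAIM (what is proved, stated in full; the proofs are below) =====
def Claim_equal_unique_str : Prop := ∀ (str : String), Dom_unique_str str → Spec_unique_str str (unique_str str)

-- ===== LEMMAS AND PROOFS =====

lemma and_shift_eq_zero (b k : ℕ) : (b &&& (1 <<< k) = 0) ↔ b.testBit k = false := by
  rw [Nat.shiftLeft_eq, one_mul, Nat.and_two_pow]
  cases h : b.testBit k <;> simp

lemma uniqueLoopA_iff (l : List Char) (b : ℕ) :
    uniqueLoopA l b = true ↔ l.Nodup ∧ ∀ c ∈ l, b.testBit c.toNat = false := by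
  induction l generalizing b with
  | nil => simp [uniqueLoopA]
  | cons c rest ih =>
    simp only [uniqueLoopA]
    by_cases h : b &&& (1 <<< c.toNat) = 0
    · rw [if_pos h, ih]
      rw [and_shift_eq_zero] at h
      constructor
      · rintro ⟨hnd, hall⟩
        have key : ∀ d ∈ rest, b.testBit d.toNat = false ∧ d ≠ c := by
          intro d hd
          have hh := hall d hd
          rw [Nat.testBit_or, Bool.or_eq_false_iff] at hh
          refine ⟨hh.1, fun he => ?_⟩
          have h2 := hh.2
          subst he
          simp [Nat.shiftLeft_eq] at h2
        refine ⟨List.nodup_cons.mpr ⟨fun hc2 => (key c hc2).2 rfl, hnd⟩, ?_⟩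
        intro d hd
        rcases List.mem_cons.mp hd with rfl | hd
        · exact h
        · exact (key d hd).1
      · rintro ⟨hnd2, hall⟩
        rw [List.nodup_cons] at hnd2
        refine ⟨hnd2.2, fun d hd => ?_⟩
        rw [Nat.testBit_or, Bool.or_eq_false_iff]
        refine ⟨hall d (List.mem_cons_of_mem _ hd), ?_⟩
        have hdc : d ≠ c := fun he => hnd2.1 (he ▸ hd)
        simp only [Nat.shiftLeft_eq, one_mul, Nat.testBit_two_pow, decide_eq_false_iff_not]
        exact fun he => hdc (Char.ext (UInt32.toNat_inj.mp he.symm))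
    · rw [if_neg h]
      refine iff_of_false (by simp) ?_
      rintro ⟨-, hall⟩
      exact h ((and_shift_eq_zero b c.toNat).mpr (hall c (List.mem_cons_self)))

lemma unique_str_iff (str : String) : unique_str str = true ↔ str.toList.Nodup := by
  rw [unique_str, uniqueLoopA_iff]
  simp [Nat.zero_testBit]

lemma length_foldl_add_le {α : Type} [BEq α] (xs : List α) (s : PySem.Set α) :
    (xs.foldl PySem.Set.add s).length ≤ s.length + xs.length := by
  induction xs generalizing s with
  | nil => simp
  | cons x rest ih =>
    simp only [List.foldl_cons, List.length_cons]
    calc (rest.foldl PySem.Set.add (PySem.Set.add s x)).length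
        ≤ (PySem.Set.add s x).length + rest.length := ih _
      _ ≤ s.length + (rest.length + 1) := by
          simp only [PySem.Set.add]
          split
          · omega
          · simp only [List.length_append, List.length_cons, List.length_nil]
            omega

lemma length_foldl_add_iff (xs : List Char) (s : PySem.Set Char) :
    (xs.foldl PySem.Set.add s).length = s.length + xs.length ↔
      xs.Nodup ∧ ∀ x ∈ xs, x ∉ s := by
  induction xs generalizing s with
  | nil => simp
  | cons x rest ih =>
    simp only [List.foldl_cons, List.length_cons, List.nodup_cons]
    by_cases hx : x ∈ s
    · have hc : (PySem.Set.add s x) = s := by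
        simp [PySem.Set.add, PySem.Set.contains, hx]
      rw [hc]
      have hle := length_foldl_add_le rest s
      constructor
      · intro h; omega
      · rintro ⟨-, hall⟩
        exact absurd hx (hall x (List.mem_cons_self))
    · have hc : (PySem.Set.add s x) = s ++ [x] := by
        simp [PySem.Set.add, PySem.Set.contains, hx]
      have h1 := ih (s ++ [x])
      simp only [List.length_append, List.length_cons, List.length_nil, Nat.zero_add] at h1
      rw [hc, show List.length s + (rest.length + 1) = List.length s + 1 + rest.length from by omega, h1]
      constructor
      · rintro ⟨hnd, hall⟩
        have hxr : x ∉ rest := fun hm => by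
          have := hall x hm
          simp at this
        refine ⟨⟨hxr, hnd⟩, ?_⟩
        intro y hy
        rcases List.mem_cons.mp hy with rfl | hy
        · exact hx
        · intro hys
          exact (hall y hy) (by simp [hys])
      · rintro ⟨⟨hxr, hnd⟩, hall⟩
        refine ⟨hnd, fun y hy => ?_⟩
        simp only [List.mem_append, List.mem_singleton]
        rintro (hys | rfl)
        · exact hall y (List.mem_cons_of_mem _ hy) hys
        · exact hxr hy

lemma unique_str_alt_iff (str : String) : unique_str_alt str = true ↔ str.toList.Nodup := by
  rw [unique_str_alt]
  have hlen : PySem.Str.len str = (str.toList.length : Int) := by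
    simp [PySem.Str.len]
  have hset : PySem.Set.len (PySem.Set.ofList str.toList)
      = ((str.toList.foldl PySem.Set.add []).length : Int) := by
    rw [PySem.Set.ofList_eq_foldl]; rfl
  rw [decide_eq_true_iff, hlen, hset]
  rw [show ((str.toList.foldl PySem.Set.add []).length : Int) = (str.toList.length : Int)
      ↔ (str.toList.foldl PySem.Set.add ([] : PySem.Set Char)).length
        = ([] : PySem.Set Char).length + str.toList.length by simp]
  rw [length_foldl_add_iff]
  simp

-- ===== VERDICT (by name: the statement is the Claim_ definition above) =====
theorem unique_str_spec : Claim_equal_unique_str := by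
  intro str _
  unfold Spec_unique_str
  cases hA : unique_str str
  · cases hB : unique_str_alt str
    · rfl
    · exact absurd ((unique_str_iff str).mpr ((unique_str_alt_iff str).mp hB)) (by simp [hA])
  · exact ((unique_str_alt_iff str).mpr ((unique_str_iff str).mp hA)).symm
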